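-- pv_equiv track=rewrite | github.com/PanJanke/AdventOfCode2024 | day9/day9.py | find_dots
-- ===== SOURCE A (Python) =====
-- def find_dots(text):
--     result = []
--     j = 0
--     i = 0
--     while (i < len(text)):
--         if text[i] == '.':
--             while (i + j < len(text)):
--                 if text[i + j] != '.':
--                     break
--                 j += 1
--             result.append((i, j))
--             i = i + j - 1
--             j = 0
--         i = i + 1
--
--     return result
-- ===== SOURCE B (Python) =====
-- def find_dots(text):
--     result = []
--     start = None
--     for i, ch in enumerate(text):
--         if ch == '.':
--             if start is None:
--                 start = i
--         elif start is not None: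
--             result.append((start, i - start))
--             start = None
--     if start is not None:
--         result.append((start, len(text) - start))
--     return result
-- ===== Notes on version B (the rewrite author's own statement) =====
-- stated objective: simpler
-- what changed: Replaced A's nested while loops with index-jump arithmetic (i = i + j - 1 and an inner run-counting scan) by a single linear pass over enumerate(text) that tracks the start of the current dot run and flushes (start, length) when the run ends or at end of input.
import Mathlib
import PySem

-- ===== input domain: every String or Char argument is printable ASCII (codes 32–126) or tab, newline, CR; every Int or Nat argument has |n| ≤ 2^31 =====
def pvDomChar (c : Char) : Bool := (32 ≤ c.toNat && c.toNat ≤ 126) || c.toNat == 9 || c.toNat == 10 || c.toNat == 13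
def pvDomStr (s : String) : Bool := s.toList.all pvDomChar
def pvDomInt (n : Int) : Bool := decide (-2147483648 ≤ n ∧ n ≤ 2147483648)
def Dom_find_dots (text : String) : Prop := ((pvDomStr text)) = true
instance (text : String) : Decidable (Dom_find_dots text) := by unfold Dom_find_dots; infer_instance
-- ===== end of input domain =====

-- B replaces A's nested index-jumping while loops by a single pass that tracks the start of the current dot run; equivalence of return values is proved below.

-- ===== PORT A =====
-- inner while loop of A: extends j while text[i+j] == '.'
def find_dots_run (cs : List Char) (i j : Nat) : Nat :=
  if h : i + j < cs.length then
    if cs[i + j] ≠ '.' then j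
    else find_dots_run cs i (j + 1)
  else j
termination_by cs.length - (i + j)

theorem find_dots_run_shift (cs : List Char) :
    ∀ i j, find_dots_run cs i (j + 1) = 1 + find_dots_run cs (i + 1) j := by
  intro i j
  induction hm : cs.length - (i + j) using Nat.strong_induction_on generalizing j with
  | _ m ih =>
    conv_lhs => rw [find_dots_run]
    conv_rhs => rw [find_dots_run]
    have e : i + (j + 1) = i + 1 + j := by omega
    rw [e]
    by_cases h1 : i + 1 + j < cs.length
    · simp only [dif_pos h1]
      by_cases h2 : cs[i + 1 + j] = '.'
      · simp only [h2, ite_not]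
        exact ih (cs.length - (i + (j + 1))) (by omega) (j + 1) rfl
      · simp only [if_pos h2]
        omega
    · simp only [dif_neg h1]
      omega

theorem find_dots_run_dot (cs : List Char) (i : Nat) (h : i < cs.length) (hd : cs[i] = '.') :
    find_dots_run cs i 0 = 1 + find_dots_run cs (i + 1) 0 := by
  rw [find_dots_run]
  simp only [Nat.add_zero, dif_pos h, hd, ite_not]
  exact find_dots_run_shift cs i 0

theorem find_dots_run_pos (cs : List Char) (i : Nat) (h : i < cs.length) (hd : cs[i] = '.') :
    1 ≤ find_dots_run cs i 0 := by
  rw [find_dots_run_dot cs i h hd]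
  omega

-- outer while loop of A (i = i + j - 1; j = 0; i = i + 1 steps i to i + j over Python ints)
def find_dots_loop (cs : List Char) (i : Nat) (acc : List (Int × Int)) : List (Int × Int) :=
  if h : i < cs.length then
    if hd : cs[i] = '.' then
      find_dots_loop cs (i + find_dots_run cs i 0)
        (acc ++ [((i : Int), (find_dots_run cs i 0 : Int))])
    else find_dots_loop cs (i + 1) acc
  else acc
termination_by cs.length - i
decreasing_by
  · have := find_dots_run_pos cs i h hd; omega
  · omega

def find_dots (text : String) : List (Int × Int) := find_dots_loop text.toList 0 []

-- ===== PORT B =====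
-- loop body of B: state = (result so far, start of the current dot run if any)
def find_dots_step (st : List (Int × Int) × Option Int) (p : Int × Char) :
    List (Int × Int) × Option Int :=
  if p.2 = '.' then
    match st.2 with
    | none => (st.1, some p.1)
    | some _ => st
  else
    match st.2 with
    | none => st
    | some s => (st.1 ++ [(s, p.1 - s)], none)

def find_dots_alt (text : String) : List (Int × Int) :=
  let cs := text.toList
  let st := (PySem.List.enumerate cs).foldl find_dots_step ([], none)
  match st.2 with
  | none => st.1
  | some s => st.1 ++ [(s, (cs.length : Int) - s)]

-- ===== PRECONDITION & SPEC =====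
def Spec_find_dots (text : String) (out : List (Int × Int)) : Prop := out = find_dots_alt text
instance (text : String) (out : List (Int × Int)) : Decidable (Spec_find_dots text out) := by unfold Spec_find_dots; infer_instance

-- ===== CLAIM (what is proved, stated in full; the proofs are below) =====
def Claim_equal_find_dots : Prop := ∀ (text : String), Dom_find_dots text → Spec_find_dots text (find_dots text)

-- ===== LEMMAS AND PROOFS =====

-- B's fold restricted to the suffix of the text from index i
def pvBF (cs : List Char) (i : Nat) (st : List (Int × Int) × Option Int) :
    List (Int × Int) × Option Int :=
  (PySem.List.enumerate (cs.drop i) (i : Int)).foldl find_dots_step st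

-- B's final flush
def pvBFin (cs : List Char) (st : List (Int × Int) × Option Int) : List (Int × Int) :=
  match st.2 with
  | none => st.1
  | some s => st.1 ++ [(s, (cs.length : Int) - s)]

theorem pvBF_ge (cs : List Char) (i : Nat) (h : cs.length ≤ i) (st) : pvBF cs i st = st := by
  unfold pvBF
  rw [List.drop_eq_nil_of_le h]
  rfl

theorem pvBF_lt (cs : List Char) (i : Nat) (h : i < cs.length) (st) :
    pvBF cs i st = pvBF cs (i + 1) (find_dots_step st ((i : Int), cs[i])) := by
  unfold pvBF
  rw [List.drop_eq_getElem_cons h, PySem.List.enumerate_cons]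
  simp [List.foldl]

theorem find_dots_run_zero (cs : List Char) (i : Nat)
    (h : ¬ (i < cs.length ∧ cs[i]? = some '.')) : find_dots_run cs i 0 = 0 := by
  rw [find_dots_run]
  split
  · next h' =>
    rw [if_pos]
    simp only [Nat.add_zero] at h' ⊢
    intro hc
    exact h ⟨h', by rw [List.getElem?_eq_getElem h', hc]⟩
  · rfl

theorem pv_base (cs : List Char) (i : Nat) (hge : cs.length ≤ i) :
    (∀ acc, pvBFin cs (pvBF cs i (acc, none)) = find_dots_loop cs i acc) ∧
    (∀ s acc, i ≤ cs.length → pvBFin cs (pvBF cs i (acc, some s)) =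
      find_dots_loop cs (i + find_dots_run cs i 0)
        (acc ++ [(s, ((i + find_dots_run cs i 0 : Nat) : Int) - s)])) := by
  constructor
  · intro acc
    rw [pvBF_ge cs i hge, find_dots_loop, dif_neg (by omega : ¬ i < cs.length)]
    rfl
  · intro s acc hle
    have hi : i = cs.length := le_antisymm hle hge
    have hz : find_dots_run cs i 0 = 0 := find_dots_run_zero cs i (by intro hc; omega)
    rw [pvBF_ge cs i hge, hz, find_dots_loop, dif_neg (by omega : ¬ i + 0 < cs.length)]
    show acc ++ [(s, (cs.length : Int) - s)] = acc ++ [(s, ((i + 0 : Nat) : Int) - s)]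
    subst hi
    norm_num

theorem pv_main (cs : List Char) : ∀ m i, cs.length - i ≤ m →
    (∀ acc, pvBFin cs (pvBF cs i (acc, none)) = find_dots_loop cs i acc) ∧
    (∀ s acc, i ≤ cs.length → pvBFin cs (pvBF cs i (acc, some s)) =
      find_dots_loop cs (i + find_dots_run cs i 0)
        (acc ++ [(s, ((i + find_dots_run cs i 0 : Nat) : Int) - s)])) := by
  intro m
  induction m with
  | zero =>
    intro i him
    exact pv_base cs i (by omega)
  | succ m ih =>
    intro i him
    by_cases hlt : i < cs.length
    · have ihn := (ih (i + 1) (by omega)).1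
      have ihs := (ih (i + 1) (by omega)).2
      by_cases hd : cs[i] = '.'
      · have hrun := find_dots_run_dot cs i hlt hd
        constructor
        · intro acc
          rw [pvBF_lt cs i hlt]
          have hstep : find_dots_step (acc, none) ((i : Int), cs[i]) = (acc, some (i : Int)) := by
            simp [find_dots_step, hd]
          rw [hstep, ihs (i : Int) acc (by omega)]
          conv_rhs => rw [find_dots_loop]
          simp only [dif_pos hlt, dif_pos hd, hrun]
          have e : i + 1 + find_dots_run cs (i + 1) 0 = i + (1 + find_dots_run cs (i + 1) 0) := by
            omega
          rw [e]
          have e2 : ((i + (1 + find_dots_run cs (i + 1) 0) : Nat) : Int) - (i : Int)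
              = ((1 + find_dots_run cs (i + 1) 0 : Nat) : Int) := by push_cast; omega
          rw [e2]
        · intro s acc hle
          rw [pvBF_lt cs i hlt]
          have hstep : find_dots_step (acc, some s) ((i : Int), cs[i]) = (acc, some s) := by
            simp [find_dots_step, hd]
          rw [hstep, ihs s acc (by omega), hrun]
          have e : i + 1 + find_dots_run cs (i + 1) 0 = i + (1 + find_dots_run cs (i + 1) 0) := by
            omega
          rw [e]
      · have hz : find_dots_run cs i 0 = 0 :=
          find_dots_run_zero cs i (by
            intro hc
            exact hd (by have := hc.2; rwa [List.getElem?_eq_getElem hlt, Option.some_inj] at this))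
        constructor
        · intro acc
          rw [pvBF_lt cs i hlt]
          have hstep : find_dots_step (acc, none) ((i : Int), cs[i]) = (acc, none) := by
            simp [find_dots_step, hd]
          rw [hstep, ihn acc]
          conv_rhs => rw [find_dots_loop]
          simp only [dif_pos hlt, dif_neg hd]
        · intro s acc hle
          rw [pvBF_lt cs i hlt]
          have hstep : find_dots_step (acc, some s) ((i : Int), cs[i]) =
              (acc ++ [(s, (i : Int) - s)], none) := by
            simp [find_dots_step, hd]
          rw [hstep, ihn _, hz]
          conv_rhs => rw [find_dots_loop]
          simp only [Nat.add_zero, dif_pos hlt, dif_neg hd]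
    · exact pv_base cs i (by omega)

-- ===== VERDICT (by name: the statement is the Claim_ definition above) =====
theorem find_dots_spec : Claim_equal_find_dots := by
  intro text _
  unfold Spec_find_dots find_dots find_dots_alt
  rw [← (pv_main text.toList text.toList.length 0 (by omega)).1 []]
  rfl
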